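-- pv_equiv track=rewrite | github.com/guryaniv/GDS | Classification/utils/utils.py | analyzeXAndYLists
-- ===== SOURCE A (Python) =====
-- def analyzeXAndYLists(nbDict, diff):
--     '''
--     Create ranges of values by the diff.
--     Return two lists of keys and values in ranges
--     '''
--     cellsLevel = {}
--     for nb in nbDict:
--         index = nbDict[nb] // diff
--         if index not in cellsLevel:
--             cellsLevel[index] = [nb]
--         else:
--             cellsLevel[index].append(nb)
--     res = {k:len(v) for k, v in sorted(cellsLevel.items())}
--     return list(res.keys()), list(res.values())
-- ===== SOURCE B (Python) =====
-- def _runs(idxs):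
--     # run-length encode a sorted list: [(value, run length), ...]
--     runs = []
--     i, n = 0, len(idxs)
--     while i < n:
--         j = i + 1
--         while j < n and idxs[j] == idxs[i]:
--             j += 1
--         runs.append((idxs[i], j - i))
--         i = j
--     return runs
--
--
-- def analyzeXAndYLists(nbDict, diff):
--     '''
--     Create ranges of values by the diff.
--     Return two lists of keys and values in ranges
--     '''
--     idxs = sorted(v // diff for v in nbDict.values())
--     runs = _runs(idxs)
--     return [k for k, _ in runs], [c for _, c in runs]
-- ===== Notes on version B (the rewrite author's own statement) =====
-- stated objective: alternative
-- what changed: Replaces the dict-of-key-lists bucketing (which stores every key in a per-bucket list and then sorts the dict items) by sort-then-run-length-encode: B sorts the list of computed indices once and emits each run's value and length in a single scan, never materialising the buckets; it trades the hash-map pass for a sort of the raw indices.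
import Mathlib
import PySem

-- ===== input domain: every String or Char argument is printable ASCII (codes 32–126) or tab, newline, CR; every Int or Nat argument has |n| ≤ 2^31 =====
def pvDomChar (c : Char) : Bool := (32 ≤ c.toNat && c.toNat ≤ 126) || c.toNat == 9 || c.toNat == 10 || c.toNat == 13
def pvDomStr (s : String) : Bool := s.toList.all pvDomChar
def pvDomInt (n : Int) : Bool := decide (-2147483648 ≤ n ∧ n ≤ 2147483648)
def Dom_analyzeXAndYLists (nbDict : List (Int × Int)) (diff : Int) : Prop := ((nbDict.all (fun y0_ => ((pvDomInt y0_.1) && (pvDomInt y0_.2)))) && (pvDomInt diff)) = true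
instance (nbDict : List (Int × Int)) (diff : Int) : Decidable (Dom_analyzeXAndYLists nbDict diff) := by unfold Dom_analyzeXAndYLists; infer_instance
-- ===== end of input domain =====

-- B replaces A's dict-of-key-buckets plus sort-of-the-items by sort-the-indices plus one
-- run-length scan (no per-bucket key lists are kept); same return value on all of Pre_.

-- ===== PORT A =====
-- 'for nb in nbDict' iterates the dict's keys and 'nbDict[nb]' looks the value up again:
-- ported as a fold over the pairs, taking p.1 as the key and Dict.get? for the lookup
-- (exact for an association list with unique keys, which Pre_ demands).
-- 'sorted(cellsLevel.items())' compares (key, bucket) tuples; the keys are distinct, so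
-- sorting by the key alone is exact.
def analyzeXAndYLists (nbDict : List (Int × Int)) (diff : Int) : List Int × List Int :=
  let d : PySem.Dict Int Int := PySem.Dict.mk nbDict
  let cellsLevel : PySem.Dict Int (List Int) :=
    nbDict.foldl (fun cl p =>
      let nb := p.1
      let index := PySem.Int.floordiv ((d.get? nb).getD 0) diff
      if cl.contains index then cl.modify index [] (fun v => v ++ [nb])
      else cl.insert index [nb]) PySem.Dict.empty
  let res := PySem.List.sorted cellsLevel.items (fun p => p.1)
  (res.map (fun p => p.1), res.map (fun p => (p.2.length : Int)))

-- ===== PORT B =====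
-- _runs: one recursive step per run of the outer while loop; the inner
-- 'while idxs[j] == idxs[i]' count is the takeWhile length, j - i = that count + 1.
def pvRuns : List Int → List (Int × Int)
  | [] => []
  | x :: xs =>
    (x, ((xs.takeWhile (fun y => y == x)).length : Int) + 1) ::
      pvRuns (xs.drop (xs.takeWhile (fun y => y == x)).length)
termination_by l => l.length
decreasing_by simp

def analyzeXAndYLists_alt (nbDict : List (Int × Int)) (diff : Int) : List Int × List Int :=
  let idxs := PySem.List.sorted (nbDict.map (fun p => PySem.Int.floordiv p.2 diff)) (fun x => x)
  let runs := pvRuns idxs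
  (runs.map (fun r => r.1), runs.map (fun r => r.2))

-- ===== PRECONDITION & SPEC =====
-- Pre_ excludes (i) diff = 0 with a nonempty dict, where Python A (and B) raises
-- ZeroDivisionError, and (ii) association lists with duplicate keys, which no Python dict
-- can present to A (the List (Int × Int) encoding permits them but they encode no dict).
def Pre_analyzeXAndYLists (nbDict : List (Int × Int)) (diff : Int) : Prop :=
  (nbDict = [] ∨ diff ≠ 0) ∧ (nbDict.map Prod.fst).Nodup
instance (nbDict : List (Int × Int)) (diff : Int) : Decidable (Pre_analyzeXAndYLists nbDict diff) := by unfold Pre_analyzeXAndYLists; infer_instance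

def pvWitness_analyzeXAndYLists : (List (Int × Int)) × Int := ([(1, 5), (2, 7), (3, -4)], 3)

def Spec_analyzeXAndYLists (nbDict : List (Int × Int)) (diff : Int) (out : List Int × List Int) : Prop := out = analyzeXAndYLists_alt nbDict diff
instance (nbDict : List (Int × Int)) (diff : Int) (out : List Int × List Int) : Decidable (Spec_analyzeXAndYLists nbDict diff out) := by unfold Spec_analyzeXAndYLists; infer_instance

-- ===== CLAIM (what is proved, stated in full; the proofs are below) =====
def Claim_equal_analyzeXAndYLists : Prop := ∀ (nbDict : List (Int × Int)) (diff : Int), Dom_analyzeXAndYLists nbDict diff → Pre_analyzeXAndYLists nbDict diff → Spec_analyzeXAndYLists nbDict diff (analyzeXAndYLists nbDict diff)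

-- ===== LEMMAS AND PROOFS =====

-- the dict lookup A repeats inside its loop returns the pair's own value when keys are unique
theorem pv_get?_mk (nbDict : List (Int × Int)) (p : Int × Int)
    (hnd : (nbDict.map Prod.fst).Nodup) (hp : p ∈ nbDict) :
    (PySem.Dict.mk nbDict).get? p.1 = some p.2 := by
  induction nbDict with
  | nil => cases hp
  | cons q l ih =>
    simp only [List.map_cons, List.nodup_cons] at hnd
    simp only [PySem.Dict.get?, PySem.Dict.mk, List.find?]
    by_cases h : q.1 == p.1
    · have hqp : q = p := by
        rcases List.mem_cons.1 hp with rfl | hpl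
        · rfl
        · exfalso
          exact hnd.1 (by simpa [(beq_iff_eq.1 h)] using List.mem_map_of_mem (f := Prod.fst) hpl)
      simp [h, hqp]
    · have hpl : p ∈ l := by
        rcases List.mem_cons.1 hp with rfl | hpl
        · simp at h
        · exact hpl
      have := ih hnd.2 hpl
      simpa [PySem.Dict.get?, PySem.Dict.mk, h] using this

-- A's contains/insert-or-append branch is extensionally Dict.modify with default []
theorem pv_branch_eq_modify (cl : PySem.Dict Int (List Int)) (idx nb : Int) :
    (if cl.contains idx then cl.modify idx [] (fun v => v ++ [nb])
     else cl.insert idx [nb]) = cl.modify idx [] (fun v => v ++ [nb]) := by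
  by_cases h : cl.contains idx
  · simp [h]
  · have hget : cl.get? idx = none := by
      simp only [PySem.Dict.get?, Option.map_eq_none_iff]
      apply List.find?_eq_none.2
      intro x hx
      by_contra hc
      exact h (List.any_eq_true.2 ⟨x, hx, by simpa using hc⟩)
    simp [h, PySem.Dict.modify, PySem.Dict.getD, hget]

theorem pv_pairwise_lt (l : List Int) (h : List.Pairwise (· ≤ ·) l) (hnd : l.Nodup) :
    List.Pairwise (· < ·) l := by
  have := List.Pairwise.and h hnd
  exact this.imp (fun hab => lt_of_le_of_ne hab.1 hab.2)

theorem pv_drop_takeWhile (xs : List Int) (p : Int → Bool) :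
    xs.drop (xs.takeWhile p).length = xs.dropWhile p := by
  induction xs with
  | nil => rfl
  | cons x t ih =>
    by_cases h : p x
    · simpa [List.takeWhile_cons, List.dropWhile_cons, h] using ih
    · simp [List.takeWhile_cons, List.dropWhile_cons, h]

-- splitting a sorted list at its leading run of x
theorem pv_sortedSplit (xs : List Int) (x : Int) (hs : List.Pairwise (· ≤ ·) xs)
    (hx : ∀ y ∈ xs, x ≤ y) :
    (∀ y ∈ xs.dropWhile (fun y => y == x), x < y) ∧
    (xs.takeWhile (fun y => y == x)).length = xs.count x ∧
    List.Pairwise (· ≤ ·) (xs.dropWhile (fun y => y == x)) := by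
  induction xs with
  | nil => simp
  | cons z t ih =>
    have hzt := List.pairwise_cons.1 hs
    by_cases h : z == x
    · have hz : z = x := beq_iff_eq.1 h
      have ⟨d1, d2, d3⟩ := ih hzt.2 (fun y hy => hx y (List.mem_cons_of_mem _ hy))
      refine ⟨by simpa [List.dropWhile_cons, h] using d1, ?_, by simpa [List.dropWhile_cons, h] using d3⟩
      simp [List.takeWhile_cons, h, hz, List.count_cons, d2]
    · have hzx : x < z := lt_of_le_of_ne (hx z (List.mem_cons_self)) (fun e => h (by simp [e.symm]))
      have hnot : x ∉ z :: t := by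
        intro hmem
        rcases List.mem_cons.1 hmem with rfl | hmt
        · exact absurd rfl (ne_of_gt hzx)
        · exact absurd (hzt.1 x hmt) (not_le.2 hzx)
      refine ⟨?_, ?_, by simpa [List.dropWhile_cons, h] using hs⟩
      · intro y hy
        rw [List.dropWhile_cons_of_neg (by simpa using h)] at hy
        rcases List.mem_cons.1 hy with rfl | hmt
        · exact hzx
        · exact lt_of_lt_of_le hzx (hzt.1 y hmt)
      · simp [List.takeWhile_cons, h, List.count_eq_zero.2 hnot]

-- run-length encoding of a sorted list, against any strictly ascending key list
theorem pv_runs_eq (l K : List Int) (hl : List.Pairwise (· ≤ ·) l)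
    (hK : List.Pairwise (· < ·) K) (hmem : ∀ x, x ∈ K ↔ x ∈ l) :
    pvRuns l = K.map (fun k => (k, (l.count k : Int))) := by
  induction hn : l.length using Nat.strong_induction_on generalizing l K with
  | _ n ih =>
  cases l with
  | nil =>
    have : K = [] := List.eq_nil_iff_forall_not_mem.2 (fun x hx => by simpa using (hmem x).1 hx)
    simp [pvRuns, this]
  | cons x xs =>
    have hxs : List.Pairwise (· ≤ ·) xs := (List.pairwise_cons.1 hl).2
    have hxle : ∀ y ∈ xs, x ≤ y := (List.pairwise_cons.1 hl).1
    obtain ⟨hrest_gt, hcount, hrest_sorted⟩ := pv_sortedSplit xs x hxs hxle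
    set m := (xs.takeWhile (fun y => y == x)).length with hm
    have hdrop : xs.drop m = xs.dropWhile (fun y => y == x) := pv_drop_takeWhile xs _
    -- K = x :: K'
    have hxK : x ∈ K := (hmem x).2 (List.mem_cons_self)
    obtain ⟨k0, K', rfl⟩ : ∃ k0 K', K = k0 :: K' := by
      cases K with
      | nil => cases hxK
      | cons a b => exact ⟨a, b, rfl⟩
    have hK' := List.pairwise_cons.1 hK
    have hk0 : k0 = x := by
      rcases List.mem_cons.1 hxK with rfl | hxK'
      · rfl
      · have h1 : k0 < x := hK'.1 x hxK'
        have h2 : x ≤ k0 := by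
          rcases List.mem_cons.1 ((hmem k0).1 List.mem_cons_self) with rfl | hmm
          · exact le_refl _
          · exact hxle _ hmm
        omega
    subst hk0
    -- membership of K' vs rest
    have hmem' : ∀ y, y ∈ K' ↔ y ∈ xs.drop m := by
      intro y
      rw [hdrop]
      constructor
      · intro hy
        have hylt : k0 < y := hK'.1 y hy
        have hyl : y ∈ k0 :: xs := (hmem y).1 (List.mem_cons_of_mem _ hy)
        rcases List.mem_cons.1 hyl with rfl | hyxs
        · exact absurd hylt (lt_irrefl _)
        · -- y ∈ xs, y ≠ k0 so not in the takeWhile prefix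
          have : y ∈ xs.takeWhile (fun z => z == k0) ++ xs.dropWhile (fun z => z == k0) := by
            rw [List.takeWhile_append_dropWhile]; exact hyxs
          rcases List.mem_append.1 this with hty | hdy
          · have := List.mem_takeWhile_imp hty
            simp at this; omega
          · exact hdy
      · intro hy
        have hygt : k0 < y := hrest_gt y hy
        have hyl : y ∈ k0 :: xs := by
          have : y ∈ xs := (List.dropWhile_sublist _).subset hy
          exact List.mem_cons_of_mem _ this
        rcases List.mem_cons.1 ((hmem y).2 hyl) with rfl | h'
        · exact absurd hygt (lt_irrefl _)
        · exact h'
    have hlen : (xs.drop m).length < n := by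
      subst hn; simp [List.length_drop]
    have ihres := ih _ hlen (xs.drop m) K' (hdrop ▸ hrest_sorted) hK'.2 hmem' rfl
    -- counts agree for keys of K'
    have hcnt' : ∀ k ∈ K', (xs.drop m).count k = (k0 :: xs).count k := by
      intro k hk
      have hkgt : k0 < k := hK'.1 k hk
      have h1 : (k0 :: xs).count k = xs.count k := by
        simp [List.count_cons]; omega
      have h2 : xs.count k = (xs.takeWhile (fun z => z == k0)).count k + (xs.dropWhile (fun z => z == k0)).count k := by
        conv_lhs => rw [← List.takeWhile_append_dropWhile (p := fun z => z == k0) (l := xs)]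
        rw [List.count_append]
      have h3 : (xs.takeWhile (fun z => z == k0)).count k = 0 := by
        apply List.count_eq_zero.2
        intro hkt
        have := List.mem_takeWhile_imp hkt
        simp at this; omega
      rw [hdrop, h1, h2, h3]; omega
    -- assemble
    have hc0 : (k0 :: xs).count k0 = m + 1 := by
      simp [List.count_cons, ← hcount]
    have htail : List.map (fun k => (k, (List.count k (List.drop m xs) : Int))) K'
        = List.map (fun k => (k, ((k0 :: xs).count k : Int))) K' :=
      List.map_congr_left (fun k hk => by simp [hcnt' k hk])
    rw [pvRuns, ← hm, ihres, htail, List.map_cons, hc0]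
    push_cast
    ring_nf

theorem pv_main (nbDict : List (Int × Int)) (diff : Int)
    (hnd : (nbDict.map Prod.fst).Nodup) :
    analyzeXAndYLists nbDict diff = analyzeXAndYLists_alt nbDict diff := by
  have key : (Int × Int) → Int := fun p => PySem.Int.floordiv p.2 diff
  simp only [analyzeXAndYLists, analyzeXAndYLists_alt]
  set l' : List (Int × Int) := nbDict.map (fun p => (PySem.Int.floordiv p.2 diff, p.1)) with hl'
  set I : List Int := nbDict.map (fun p => PySem.Int.floordiv p.2 diff) with hI
  -- rewrite A's loop into the standard modify fold over l'
  have hstep :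
      nbDict.foldl (fun cl p =>
        let nb := p.1
        let index := PySem.Int.floordiv (((PySem.Dict.mk nbDict).get? nb).getD 0) diff
        if cl.contains index then cl.modify index [] (fun v => v ++ [nb])
        else cl.insert index [nb]) PySem.Dict.empty
      = List.foldl (fun d q => d.modify q.1 [] (fun v => v ++ [q.2])) PySem.Dict.empty l' := by
    rw [hl', List.foldl_map]
    apply PySem.List.foldl_congr_mem
    intro cl p hp
    simp only [pv_get?_mk nbDict p hnd hp, Option.getD_some]
    exact pv_branch_eq_modify cl _ p.1
  rw [hstep]
  set D := List.foldl (fun d q => d.modify q.1 [] (fun v => v ++ [q.2])) PySem.Dict.empty l' with hD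
  have hkeys : D.keys = PySem.Set.update PySem.Dict.empty.keys (l'.map Prod.fst) :=
    PySem.Dict.keys_foldl_modify_key l' Prod.fst [] (fun _ x v => v ++ [x.2]) PySem.Dict.empty
  have hkeysI : D.keys = PySem.Set.ofList I := by
    rw [hkeys, hl', hI, List.map_map]
    rfl
  have hmemkeys : ∀ x, x ∈ D.keys ↔ x ∈ I := by
    intro x; rw [hkeysI]; exact PySem.Set.mem_ofList I x
  have hnodup : D.keys.Nodup :=
    PySem.Dict.nodup_keys_foldl_modify_key l' Prod.fst [] (fun _ x v => v ++ [x.2]) PySem.Dict.empty (by simp [PySem.Dict.empty, PySem.Dict.keys])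
  have hgetD : ∀ c, D.getD c [] = (l'.filter (fun q => q.1 == c)).map (fun q => q.2) := by
    intro c
    have := PySem.Dict.getD_foldl_modify_append l' PySem.Dict.empty c
    simpa [PySem.Dict.getD, PySem.Dict.get?, PySem.Dict.empty] using this
  have hitems : D.items = D.keys.map (fun k => (k, D.getD k [])) :=
    PySem.Dict.items_eq_map_keys D hnodup []
  set S := PySem.List.sorted D.keys (fun x => x) with hS
  have hSperm : S.Perm D.keys := PySem.List.sorted_perm D.keys (fun x => x) false
  have hSnodup : S.Nodup := (hSperm.nodup_iff).2 hnodup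
  have hSle : List.Pairwise (· ≤ ·) S := PySem.List.sorted_pairwise D.keys (fun x => x)
  have hSlt : List.Pairwise (· < ·) S := pv_pairwise_lt S hSle hSnodup
  have hsorted_items :
      PySem.List.sorted D.items (fun p => p.1) = S.map (fun k => (k, D.getD k [])) := by
    apply PySem.List.sorted_eq_of_perm_of_pairwise_lt
    · rw [hitems]; exact hSperm.map _
    · exact List.pairwise_map.2 (by simpa using hSlt)
  rw [hsorted_items]
  -- count of each key
  have hblen : ∀ k, (D.getD k []).length = I.count k := by
    intro k
    rw [hgetD k, List.length_map, ← List.countP_eq_length_filter, hl', hI, List.countP_map,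
      List.count, List.countP_map]
    rfl
  -- B side
  have hIperm : (PySem.List.sorted I (fun x => x)).Perm I := PySem.List.sorted_perm I (fun x => x) false
  have hruns : pvRuns (PySem.List.sorted I (fun x => x))
      = S.map (fun k => (k, ((PySem.List.sorted I (fun x => x)).count k : Int))) := by
    apply pv_runs_eq
    · exact PySem.List.sorted_pairwise I (fun x => x)
    · exact hSlt
    · intro x; rw [hSperm.mem_iff, hIperm.mem_iff]; exact hmemkeys x
  rw [hruns]
  simp only [List.map_map, Prod.mk.injEq]
  constructor
  · simp
  · apply List.map_congr_left
    intro k hk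
    simp [Function.comp, hblen k, hIperm.count_eq]


-- ===== VERDICT (by name: the statement is the Claim_ definition above) =====
theorem analyzeXAndYLists_spec : Claim_equal_analyzeXAndYLists := by
  intro nbDict diff _ hpre
  exact pv_main nbDict diff hpre.2
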